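-- pv_equiv track=rewrite | github.com/Harchytekt/IPv4-Delmotte | code/Delmotte.py | createsAdd
-- ===== SOURCE A (Python) =====
-- def createsAdd(addr, value, i, x):
-- 	"""
-- 	Return the value of the index to change.
-- 	"""
-- 	val = str(value)
-- 	if i == 0:
-- 		return addr + val
-- 	else:
-- 		addr += val
-- 		while i != 0:
-- 			if (x == 0) or (x == 1 and i != 1):
-- 				addr += ".0"
-- 			elif (x == -1) or (x == -2 and i != 1):
-- 				addr += ".255"
-- 			elif x == -2:
-- 				addr += ".254"
-- 			elif x == 1:
-- 				addr += ".1"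
-- 			i -= 1
-- 		return addr
-- ===== SOURCE B (Python) =====
-- def createsAdd(addr, value, i, x):
--     val = str(value)
--     if i == 0:
--         return addr + val
--     # closed form: every loop step except the last (i==1) appends R, the last appends F
--     if x == 0:
--         rep, fin = ".0", ".0"
--     elif x == 1:
--         rep, fin = ".0", ".1"
--     elif x == -1:
--         rep, fin = ".255", ".255"
--     elif x == -2:
--         rep, fin = ".255", ".254"
--     else:
--         rep, fin = "", ""
--     return addr + val + rep * (i - 1) + fin
-- ===== Notes on version B (the rewrite author's own statement) =====
-- stated objective: simpler
-- what changed: Replaces the while loop with a closed-form string construction: pick a repeated suffix and a final suffix from x once and build addr+str(value)+rep*(i-1)+fin directly.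
-- outside the precondition, e.g. on createsAdd('a', 5, -1, 0): A does not finish within the time limit, B returns 'a5.0'
import Mathlib
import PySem

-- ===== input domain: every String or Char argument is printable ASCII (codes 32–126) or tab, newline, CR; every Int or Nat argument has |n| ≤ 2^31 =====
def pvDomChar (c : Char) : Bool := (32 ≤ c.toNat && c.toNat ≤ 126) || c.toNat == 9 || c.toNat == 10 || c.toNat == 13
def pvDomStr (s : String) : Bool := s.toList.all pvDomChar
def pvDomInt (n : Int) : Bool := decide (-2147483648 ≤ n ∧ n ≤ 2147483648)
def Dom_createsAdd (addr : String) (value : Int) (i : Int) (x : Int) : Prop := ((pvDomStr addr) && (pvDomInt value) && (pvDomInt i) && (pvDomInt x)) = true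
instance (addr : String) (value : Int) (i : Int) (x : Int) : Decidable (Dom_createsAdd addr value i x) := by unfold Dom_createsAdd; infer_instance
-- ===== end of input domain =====

-- B replaces A's while loop by a closed-form string build (repeated suffix + final suffix); objective: simpler.

-- ===== PORT A =====
-- one body of A's while loop, branches in A's order
def createsAddStep (addr : String) (i : Int) (x : Int) : String :=
  if x = 0 ∨ (x = 1 ∧ i ≠ 1) then addr ++ ".0"
  else if x = -1 ∨ (x = -2 ∧ i ≠ 1) then addr ++ ".255"
  else if x = -2 then addr ++ ".254"
  else if x = 1 then addr ++ ".1"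
  else addr

-- 'while i != 0: … ; i -= 1' with fuel i.toNat: exact for i ≥ 0 (Pre_); for i < 0 the Python loop diverges, excluded by Pre_
def createsAddLoop (addr : String) (x : Int) : Int → Nat → String
  | _, 0 => addr
  | i, n+1 => createsAddLoop (createsAddStep addr i x) x (i - 1) n

def createsAdd (addr : String) (value : Int) (i : Int) (x : Int) : String :=
  let val := PySem.Int.toStr value
  if i = 0 then addr ++ val
  else createsAddLoop (addr ++ val) x i i.toNat

-- ===== PORT B =====
-- Source B's elif chain picking (rep, fin)
def createsAddSuffixes (x : Int) : String × String :=
  if x = 0 then (".0", ".0")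
  else if x = 1 then (".0", ".1")
  else if x = -1 then (".255", ".255")
  else if x = -2 then (".255", ".254")
  else ("", "")

-- Python 'rep * n' (negative n gives "")
def strMul (s : String) (n : Int) : String := String.join (List.replicate n.toNat s)

def createsAdd_alt (addr : String) (value : Int) (i : Int) (x : Int) : String :=
  let val := PySem.Int.toStr value
  if i = 0 then addr ++ val
  else
    let p := createsAddSuffixes x
    addr ++ val ++ strMul p.1 (i - 1) ++ p.2

-- ===== PRECONDITION & SPEC =====
-- Pre_ excludes i < 0, on which A's 'while i != 0' never terminates.
def Pre_createsAdd (addr : String) (value : Int) (i : Int) (x : Int) : Prop := 0 ≤ i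
instance (addr : String) (value : Int) (i : Int) (x : Int) : Decidable (Pre_createsAdd addr value i x) := by unfold Pre_createsAdd; infer_instance
def pvWitness_createsAdd : String × Int × Int × Int := ("10.0", 3, 2, 1)

def Spec_createsAdd (addr : String) (value : Int) (i : Int) (x : Int) (out : String) : Prop := out = createsAdd_alt addr value i x
instance (addr : String) (value : Int) (i : Int) (x : Int) (out : String) : Decidable (Spec_createsAdd addr value i x out) := by unfold Spec_createsAdd; infer_instance

-- ===== CLAIM (what is proved, stated in full; the proofs are below) =====
def Claim_equal_createsAdd : Prop := ∀ (addr : String) (value : Int) (i : Int) (x : Int), Dom_createsAdd addr value i x → Pre_createsAdd addr value i x → Spec_createsAdd addr value i x (createsAdd addr value i x)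

-- ===== LEMMAS AND PROOFS =====
lemma step_one (addr : String) (x : Int) :
    createsAddStep addr 1 x = addr ++ (createsAddSuffixes x).2 := by
  unfold createsAddStep createsAddSuffixes
  split_ifs <;> simp_all

lemma step_ne (addr : String) (i x : Int) (h : i ≠ 1) :
    createsAddStep addr i x = addr ++ (createsAddSuffixes x).1 := by
  unfold createsAddStep createsAddSuffixes
  split_ifs <;> simp_all

lemma strMul_zero (s : String) : strMul s 0 = "" := by
  simp [strMul, String.join]

lemma foldl_append_str (l : List String) : ∀ (s : String),
    l.foldl (fun r t => r ++ t) s = s ++ l.foldl (fun r t => r ++ t) "" := by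
  induction l with
  | nil => intro s; simp
  | cons a l ih =>
    intro s
    simp only [List.foldl_cons]
    rw [ih (s ++ a), ih ("" ++ a)]
    simp [String.append_assoc]

lemma strMul_succ (s : String) (n : Nat) :
    strMul s ((n : Int) + 1) = s ++ strMul s (n : Int) := by
  have h1 : ((n : Int) + 1).toNat = n + 1 := by omega
  have h2 : ((n : Int)).toNat = n := by omega
  simp only [strMul, h1, h2, List.replicate_succ, String.join, List.foldl_cons]
  rw [foldl_append_str]
  simp

lemma loop_closed (x : Int) : ∀ (n : Nat) (addr : String),
    createsAddLoop addr x ((n : Int) + 1) (n + 1)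
      = addr ++ strMul (createsAddSuffixes x).1 (n : Int) ++ (createsAddSuffixes x).2 := by
  intro n
  induction n with
  | zero =>
    intro addr
    simp [createsAddLoop, strMul_zero, step_one]
  | succ m ih =>
    intro addr
    have hne : ((m : Int) + 1) + 1 ≠ 1 := by omega
    have hstep : createsAddLoop addr x (((m : Int) + 1) + 1) (m + 1 + 1)
        = createsAddLoop (createsAddStep addr (((m : Int) + 1) + 1) x) x ((m : Int) + 1) (m + 1) := by
      simp [createsAddLoop]
    calc createsAddLoop addr x (((m + 1 : Nat) : Int) + 1) (m + 1 + 1)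
        = createsAddLoop (createsAddStep addr (((m : Int) + 1) + 1) x) x ((m : Int) + 1) (m + 1) := by
          push_cast; exact hstep
      _ = (addr ++ (createsAddSuffixes x).1) ++ strMul (createsAddSuffixes x).1 (m : Int) ++ (createsAddSuffixes x).2 := by
          rw [ih, step_ne _ _ _ hne]
      _ = addr ++ strMul (createsAddSuffixes x).1 ((m + 1 : Nat) : Int) ++ (createsAddSuffixes x).2 := by
          push_cast
          rw [strMul_succ]
          simp [String.append_assoc]

-- ===== VERDICT (by name: the statement is the Claim_ definition above) =====
theorem createsAdd_spec : Claim_equal_createsAdd := by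
  intro addr value i x _ hpre
  unfold Spec_createsAdd createsAdd createsAdd_alt
  by_cases h0 : i = 0
  · simp [h0]
  · have hpos : 0 < i := lt_of_le_of_ne hpre (Ne.symm h0)
    obtain ⟨n, hn⟩ : ∃ n : Nat, i = (n : Int) + 1 := ⟨(i - 1).toNat, by omega⟩
    have htn : i.toNat = n + 1 := by omega
    have hsub : i - 1 = (n : Int) := by omega
    subst hn
    have hne0 : ¬((n : Int) + 1 = 0) := by omega
    have h1 : ((n : Int) + 1).toNat = n + 1 := by omega
    have h2 : (n : Int) + 1 - 1 = (n : Int) := by omega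
    rw [if_neg hne0, if_neg hne0, h1, h2, loop_closed]
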